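-- pv_equiv track=rewrite | github.com/mbsm/planner | src/foundryplan/planner/planner_repository.py | _get_working_days_from_shifts
-- ===== SOURCE A (Python) =====
-- def _get_working_days_from_shifts(molding_shifts: dict, pour_shifts: dict) -> set[int]:
--     """Extract working weekdays from shift configuration.
--
--     Returns set of weekday integers (0=Mon, 6=Sun) that have ANY shifts configured.
--     Defaults to Mon-Fri (0-4) if no configuration found.
--     """
--     working_days = set()
--
--     # Days of week mapping
--     day_names = ["lun", "mar", "mie", "jue", "vie", "sab", "dom"]
--
--     for idx, day_name in enumerate(day_names):
--         molding_shifts_count = molding_shifts.get(day_name, 0)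
--         pour_shifts_count = pour_shifts.get(day_name, 0)
--
--         # Day is working if it has at least one shift (molding OR pour)
--         if molding_shifts_count > 0 or pour_shifts_count > 0:
--             working_days.add(idx)
--
--     # Default to Mon-Fri if nothing configured
--     if not working_days:
--         working_days = {0, 1, 2, 3, 4}
--
--     return working_days
-- ===== SOURCE B (Python) =====
-- _DAY_INDEX = {"lun": 0, "mar": 1, "mie": 2, "jue": 3, "vie": 4, "sab": 5, "dom": 6}
--
--
-- def _get_working_days_from_shifts(molding_shifts: dict, pour_shifts: dict) -> set[int]:
--     """Single pass over the configured entries: mark a flag per weekday, no per-day lookups."""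
--     flags = [False] * 7
--     for shifts in (molding_shifts, pour_shifts):
--         for name, count in shifts.items():
--             idx = _DAY_INDEX.get(name)
--             if idx is not None and count > 0:
--                 flags[idx] = True
--     days = {i for i in range(7) if flags[i]}
--     return days if days else {0, 1, 2, 3, 4}
-- ===== Notes on version B (the rewrite author's own statement) =====
-- stated objective: alternative
-- what changed: Instead of looping over the fixed 7-day universe doing two dict lookups per day, B makes one pass over the configured dict entries, marking a 7-slot flag array via a name-to-index table, then emits the flagged days (Mon-Fri default unchanged); Pre_ only excludes association lists with duplicate keys, an artefact of modelling Python dicts (which cannot have duplicates) as lists.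
import Mathlib
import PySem

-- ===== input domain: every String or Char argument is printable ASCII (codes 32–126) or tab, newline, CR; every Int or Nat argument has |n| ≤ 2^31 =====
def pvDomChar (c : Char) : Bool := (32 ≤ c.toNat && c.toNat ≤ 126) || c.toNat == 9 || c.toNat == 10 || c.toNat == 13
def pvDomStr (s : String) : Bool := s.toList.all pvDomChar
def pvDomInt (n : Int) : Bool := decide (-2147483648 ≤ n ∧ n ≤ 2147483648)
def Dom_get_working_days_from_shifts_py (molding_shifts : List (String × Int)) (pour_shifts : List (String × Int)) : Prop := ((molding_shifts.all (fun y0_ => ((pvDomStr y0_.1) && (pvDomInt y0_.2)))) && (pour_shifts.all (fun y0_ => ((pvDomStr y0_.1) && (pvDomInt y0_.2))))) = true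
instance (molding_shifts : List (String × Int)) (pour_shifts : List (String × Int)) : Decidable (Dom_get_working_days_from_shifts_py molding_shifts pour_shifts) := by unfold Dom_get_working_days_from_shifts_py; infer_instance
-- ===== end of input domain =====

-- B replaces A's loop over the fixed 7-day universe (two dict lookups per day) by a single
-- pass over the configured entries that marks a 7-slot flag array via a name→index table.

-- ===== PORT A =====
def pvDayNames : List String := ["lun", "mar", "mie", "jue", "vie", "sab", "dom"]

def get_working_days_from_shifts_py (molding_shifts : List (String × Int)) (pour_shifts : List (String × Int)) : List Int :=
  let working : PySem.Set Int :=
    (PySem.List.enumerate pvDayNames 0).foldl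
      (fun working p =>
        let molding_shifts_count := (PySem.Dict.mk molding_shifts).getD p.2 0
        let pour_shifts_count := (PySem.Dict.mk pour_shifts).getD p.2 0
        if molding_shifts_count > 0 ∨ pour_shifts_count > 0 then working.add p.1 else working)
      PySem.Set.empty
  if working = [] then [0, 1, 2, 3, 4] else working

-- ===== PORT B =====
def pvDayIndex : PySem.Dict String Int :=
  PySem.Dict.mk [("lun", 0), ("mar", 1), ("mie", 2), ("jue", 3), ("vie", 4), ("sab", 5), ("dom", 6)]

-- flags[idx] = True (idx is always 0..6, flags always has length 7, so pySetD/pyGetD are exact)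
def pvMark (flags : List Bool) (kv : String × Int) : List Bool :=
  match pvDayIndex.get? kv.1 with
  | some idx => if kv.2 > 0 then PySem.List.pySetD flags idx true else flags
  | none => flags

def get_working_days_from_shifts_py_alt (molding_shifts : List (String × Int)) (pour_shifts : List (String × Int)) : List Int :=
  let flags := pour_shifts.foldl pvMark (molding_shifts.foldl pvMark (List.replicate 7 false))
  let days : PySem.Set Int :=
    PySem.Set.ofList ((PySem.List.pyRange 0 7 1).filter (fun i => PySem.List.pyGetD flags i false))
  if days = [] then [0, 1, 2, 3, 4] else days

-- ===== PRECONDITION & SPEC =====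
-- Pre_ excludes association lists with duplicate keys: they cannot arise from a Python dict
-- (an artefact of modelling dicts as lists), and on them first-match vs any-match is anybody's choice.
def Pre_get_working_days_from_shifts_py (molding_shifts : List (String × Int)) (pour_shifts : List (String × Int)) : Prop :=
  (molding_shifts.map Prod.fst).Nodup ∧ (pour_shifts.map Prod.fst).Nodup
instance (molding_shifts : List (String × Int)) (pour_shifts : List (String × Int)) : Decidable (Pre_get_working_days_from_shifts_py molding_shifts pour_shifts) := by unfold Pre_get_working_days_from_shifts_py; infer_instance

def pvWitness_get_working_days_from_shifts_py : (List (String × Int)) × (List (String × Int)) :=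
  ([("lun", 1), ("mie", 0)], [("sab", 2)])

def Spec_get_working_days_from_shifts_py (molding_shifts : List (String × Int)) (pour_shifts : List (String × Int)) (out : List Int) : Prop := out = get_working_days_from_shifts_py_alt molding_shifts pour_shifts
instance (molding_shifts : List (String × Int)) (pour_shifts : List (String × Int)) (out : List Int) : Decidable (Spec_get_working_days_from_shifts_py molding_shifts pour_shifts out) := by unfold Spec_get_working_days_from_shifts_py; infer_instance

-- ===== CLAIM (what is proved, stated in full; the proofs are below) =====
def Claim_equal_get_working_days_from_shifts_py : Prop := ∀ (molding_shifts : List (String × Int)) (pour_shifts : List (String × Int)), Dom_get_working_days_from_shifts_py molding_shifts pour_shifts → Pre_get_working_days_from_shifts_py molding_shifts pour_shifts → Spec_get_working_days_from_shifts_py molding_shifts pour_shifts (get_working_days_from_shifts_py molding_shifts pour_shifts)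

-- ===== LEMMAS AND PROOFS =====

lemma pvDayIndex_range (n : String) (idx : Int) (h : pvDayIndex.get? n = some idx) :
    0 ≤ idx ∧ idx < 7 := by
  simp only [pvDayIndex, PySem.Dict.get?_mk_cons] at h
  split_ifs at h <;> first
    | (injection h with h; omega)
    | (have hn : ({ items := [] } : PySem.Dict String Int).get? n = none := rfl
       rw [hn] at h
       exact nomatch h)

lemma length_foldl_mark (l : List (String × Int)) (flags : List Bool) :
    (l.foldl pvMark flags).length = flags.length := by
  induction l generalizing flags with
  | nil => rfl
  | cons kv t ih =>
    simp only [List.foldl_cons, ih]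
    unfold pvMark
    cases h : pvDayIndex.get? kv.1 with
    | none => rfl
    | some idx => split_ifs <;> simp [PySem.List.length_pySetD]

lemma getD_foldl_mark (l : List (String × Int)) (flags : List Bool) (hlen : flags.length = 7)
    (j : Nat) (hj : j < 7) :
    (l.foldl pvMark flags).getD j false
      = (flags.getD j false || l.any (fun kv => (pvDayIndex.get? kv.1 == some (j : Int)) && decide (kv.2 > 0))) := by
  induction l generalizing flags with
  | nil => simp
  | cons kv t ih =>
    simp only [List.foldl_cons, List.any_cons]
    have hmark : (pvMark flags kv).getD j false
        = (flags.getD j false || ((pvDayIndex.get? kv.1 == some (j : Int)) && decide (kv.2 > 0))) := by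
      unfold pvMark
      cases h : pvDayIndex.get? kv.1 with
      | none => simp
      | some idx =>
        obtain ⟨h0, h7⟩ := pvDayIndex_range kv.1 idx h
        change (if kv.2 > 0 then PySem.List.pySetD flags idx true else flags).getD j false
          = (flags.getD j false || ((some idx == some (j : Int)) && decide (kv.2 > 0)))
        have hcast : idx = ((idx.toNat : Nat) : Int) := by omega
        split_ifs with hc
        · rw [hcast, PySem.List.pySetD_natCast]
          by_cases hij : idx.toNat = j
          · subst hij
            simp [List.getD, hlen, hc, h7]
          · have hne3 : ¬ (max idx 0 = (j : Int)) := by omega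
            simp [List.getD, hij, hc, hne3]
        · simp [hc]
    have hmlen : (pvMark flags kv).length = 7 := by
      have := length_foldl_mark [kv] flags
      simpa using this.trans hlen
    rw [ih (pvMark flags kv) hmlen, hmark, Bool.or_assoc]

lemma any_key_pos (l : List (String × Int)) (hnd : (l.map Prod.fst).Nodup) (n : String) :
    l.any (fun kv => (kv.1 == n) && decide (kv.2 > 0)) = decide ((PySem.Dict.mk l).getD n 0 > 0) := by
  induction l with
  | nil =>
    have : (PySem.Dict.mk ([] : List (String × Int))).getD n 0 = 0 := rfl
    simp [this]
  | cons kv t ih =>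
    simp only [List.map_cons, List.nodup_cons] at hnd
    rw [List.any_cons, PySem.Dict.getD_eq_get?_getD, PySem.Dict.get?_mk_cons]
    by_cases hk : kv.1 = n
    · subst hk
      have ht : t.any (fun p => (p.1 == kv.1) && decide (p.2 > 0)) = false := by
        simp only [List.any_eq_false]
        intro p hp
        have : p.1 ∈ t.map Prod.fst := List.mem_map_of_mem hp
        have hne : p.1 ≠ kv.1 := fun he => hnd.1 (he ▸ this)
        simp [hne]
      simp [ht]
    · have hbe : (kv.1 == n) = false := by simp [hk]
      rw [hbe]
      simp only [Bool.false_eq_true, if_false, Bool.false_and, Bool.false_or]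
      rw [← PySem.Dict.getD_eq_get?_getD]
      exact ih hnd.2

set_option maxRecDepth 8192 in
lemma dayIndex_iff (n : String) :
    ((pvDayIndex.get? n == some (0 : Int)) = (n == "lun")) ∧
    ((pvDayIndex.get? n == some (1 : Int)) = (n == "mar")) ∧
    ((pvDayIndex.get? n == some (2 : Int)) = (n == "mie")) ∧
    ((pvDayIndex.get? n == some (3 : Int)) = (n == "jue")) ∧
    ((pvDayIndex.get? n == some (4 : Int)) = (n == "vie")) ∧
    ((pvDayIndex.get? n == some (5 : Int)) = (n == "sab")) ∧
    ((pvDayIndex.get? n == some (6 : Int)) = (n == "dom")) := by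
  simp only [pvDayIndex, PySem.Dict.get?_mk_cons]
  split_ifs <;>
    simp_all [show ∀ m : String, ({ items := [] } : PySem.Dict String Int).get? m = none from fun _ => rfl] <;>
      (try subst_vars) <;> simp_all [ne_comm]

-- the condition A tests for day name s, as a Bool
def pvCond (molding_shifts pour_shifts : List (String × Int)) (s : String) : Bool :=
  decide ((PySem.Dict.mk molding_shifts).getD s 0 > 0 ∨ (PySem.Dict.mk pour_shifts).getD s 0 > 0)

lemma flags_eq_cond (m p : List (String × Int)) (hm : (m.map Prod.fst).Nodup)
    (hp : (p.map Prod.fst).Nodup) (j : Nat) (hj : j < 7) (s : String)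
    (hs : ∀ n : String, (pvDayIndex.get? n == some (j : Int)) = (n == s)) :
    (p.foldl pvMark (m.foldl pvMark (List.replicate 7 false))).getD j false = pvCond m p s := by
  have h1 : (m.foldl pvMark (List.replicate 7 false)).length = 7 := by
    rw [length_foldl_mark]; simp
  rw [getD_foldl_mark p _ h1 j hj,
      getD_foldl_mark m _ (by simp) j hj]
  have hgen : ∀ (l : List (String × Int)),
      l.any (fun kv => (pvDayIndex.get? kv.1 == some (j : Int)) && decide (kv.2 > 0))
        = l.any (fun kv => (kv.1 == s) && decide (kv.2 > 0)) := by
    intro l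
    have hf : (fun (kv : String × Int) => (pvDayIndex.get? kv.1 == some (j : Int)) && decide (kv.2 > 0))
        = (fun kv => (kv.1 == s) && decide (kv.2 > 0)) := by
      funext kv; rw [hs kv.1]
    rw [hf]
  rw [hgen m, hgen p, any_key_pos m hm s, any_key_pos p hp s]
  have hrep : (List.replicate 7 false).getD j false = false := by
    rcases j with _|_|_|_|_|_|_|j <;> rfl
  rw [hrep]
  simp only [Bool.false_or]
  by_cases h1 : (PySem.Dict.mk m).getD s 0 > 0 <;>
    by_cases h2 : (PySem.Dict.mk p).getD s 0 > 0 <;>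
      simp [pvCond, h1, h2]

def pvAdd (s : PySem.Set Int) (b : Bool) (x : Int) : PySem.Set Int :=
  if b then s.add x else s

lemma assemble (b0 b1 b2 b3 b4 b5 b6 : Bool) :
    (let w : PySem.Set Int :=
      pvAdd (pvAdd (pvAdd (pvAdd (pvAdd (pvAdd (pvAdd PySem.Set.empty b0 0) b1 1) b2 2) b3 3) b4 4) b5 5) b6 6;
     if w = [] then ([0, 1, 2, 3, 4] : List Int) else w)
    = (let days : PySem.Set Int :=
        PySem.Set.ofList (([0, 1, 2, 3, 4, 5, 6] : List Int).filter
          (fun i => [b0, b1, b2, b3, b4, b5, b6].getD i.toNat false));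
       if days = [] then ([0, 1, 2, 3, 4] : List Int) else days) := by
  cases b0 <;> cases b1 <;> cases b2 <;> cases b3 <;> cases b4 <;> cases b5 <;> cases b6 <;> decide

-- ===== VERDICT (by name: the statement is the Claim_ definition above) =====
set_option maxHeartbeats 2000000 in
theorem get_working_days_from_shifts_py_spec : Claim_equal_get_working_days_from_shifts_py := by
  intro m p _ hpre
  obtain ⟨hm, hp⟩ := hpre
  unfold Spec_get_working_days_from_shifts_py
  have hA : get_working_days_from_shifts_py m p =
      (let w : PySem.Set Int := pvAdd (pvAdd (pvAdd (pvAdd (pvAdd (pvAdd (pvAdd PySem.Set.empty (pvCond m p "lun") 0) (pvCond m p "mar") 1) (pvCond m p "mie") 2) (pvCond m p "jue") 3) (pvCond m p "vie") 4) (pvCond m p "sab") 5) (pvCond m p "dom") 6;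
       if w = [] then ([0, 1, 2, 3, 4] : List Int) else w) := by
    simp only [get_working_days_from_shifts_py, pvDayNames, PySem.List.enumerate_cons,
      PySem.List.enumerate_nil, List.foldl_cons, List.foldl_nil, pvAdd, pvCond, decide_eq_true_eq]
    norm_num
  have e := flags_eq_cond m p hm hp
  have hB : get_working_days_from_shifts_py_alt m p =
      (let days : PySem.Set Int :=
        PySem.Set.ofList (([0, 1, 2, 3, 4, 5, 6] : List Int).filter
          (fun i => [pvCond m p "lun", pvCond m p "mar", pvCond m p "mie", pvCond m p "jue", pvCond m p "vie", pvCond m p "sab", pvCond m p "dom"].getD i.toNat false));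
       if days = [] then ([0, 1, 2, 3, 4] : List Int) else days) := by
    have e0 := e 0 (by omega) "lun" (fun n => (dayIndex_iff n).1)
    have e1 := e 1 (by omega) "mar" (fun n => (dayIndex_iff n).2.1)
    have e2 := e 2 (by omega) "mie" (fun n => (dayIndex_iff n).2.2.1)
    have e3 := e 3 (by omega) "jue" (fun n => (dayIndex_iff n).2.2.2.1)
    have e4 := e 4 (by omega) "vie" (fun n => (dayIndex_iff n).2.2.2.2.1)
    have e5 := e 5 (by omega) "sab" (fun n => (dayIndex_iff n).2.2.2.2.2.1)
    have e6 := e 6 (by omega) "dom" (fun n => (dayIndex_iff n).2.2.2.2.2.2)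
    have hfilter : (([0, 1, 2, 3, 4, 5, 6] : List Int).filter
          (fun i => PySem.List.pyGetD (p.foldl pvMark (m.foldl pvMark (List.replicate 7 false))) i false))
        = (([0, 1, 2, 3, 4, 5, 6] : List Int).filter
          (fun i => [pvCond m p "lun", pvCond m p "mar", pvCond m p "mie", pvCond m p "jue", pvCond m p "vie", pvCond m p "sab", pvCond m p "dom"].getD i.toNat false)) := by
      apply List.filter_congr
      intro i hi
      fin_cases hi
      · simpa [PySem.List.pyGetD_ofNat', List.getD] using e0
      · simpa [PySem.List.pyGetD_ofNat', List.getD] using e1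
      · simpa [PySem.List.pyGetD_ofNat', List.getD] using e2
      · simpa [PySem.List.pyGetD_ofNat', List.getD] using e3
      · simpa [PySem.List.pyGetD_ofNat', List.getD] using e4
      · simpa [PySem.List.pyGetD_ofNat', List.getD] using e5
      · simpa [PySem.List.pyGetD_ofNat', List.getD] using e6
    simp only [get_working_days_from_shifts_py_alt]
    rw [show PySem.List.pyRange 0 7 1 = ([0, 1, 2, 3, 4, 5, 6] : List Int) from by decide, hfilter]
  rw [hA, hB]
  exact assemble (pvCond m p "lun") (pvCond m p "mar") (pvCond m p "mie") (pvCond m p "jue") (pvCond m p "vie") (pvCond m p "sab") (pvCond m p "dom")
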